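-- pv_equiv track=rewrite | github.com/pfg1008/App-PREVENCI-N | App_v2/App_v2/logic_engine.py | combinar_gen
-- ===== SOURCE A (Python) =====
-- def combinar_gen(lista_de_alelos_por_snp: list, gen: str):
--     """
--     Combina los alelos de múltiples SNPs de un gen en un diplotipo final.
--     (Versión actualizada con lógica de prioridad CYP2D6 detallada).
--     """
--     # Tu nueva lógica de separación de alelos
--     alelos_unicos = list(
--         a for sublist in lista_de_alelos_por_snp
--         for a in sublist
--         if not a in ['*1','*4','*10','*10*4']
--     )
--
--     alelos_especiales = list(
--         a for sublist in lista_de_alelos_por_snp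
--         for a in sublist
--         if  a in ['*4','*10','*10*4']
--     )
--
--     finales = []
--
--     if gen == 'CYP2D6':
--         # Tu nueva lógica de bucles 'while'
--         tiene_10_4 = '*10*4' in alelos_especiales
--         tiene_10 = '*10' in alelos_especiales
--         tiene_4 = '*4' in alelos_especiales
--
--         flag1=True
--         while flag1:
--             if tiene_10_4 and tiene_10 and tiene_4:
--                 alelos_especiales.remove('*10')
--                 alelos_especiales.remove('*10*4')
--                 alelos_especiales.remove('*4')
--                 finales.append('*4')
--                 tiene_10_4 = '*10*4' in alelos_especiales
--                 tiene_10 = '*10' in alelos_especiales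
--                 tiene_4 = '*4' in alelos_especiales
--             else: flag1 = False
--
--         flag2 = True
--         while flag2:
--             if tiene_10_4 and tiene_10:
--                 alelos_especiales.remove('*10')
--                 alelos_especiales.remove('*10*4')
--                 tiene_10_4 = '*10*4' in alelos_especiales
--                 tiene_10 = '*10' in alelos_especiales
--                 finales.append('*10')
--             else: flag2 = False
--
--         for i in range(alelos_especiales.count('*10')):
--             alelos_especiales.remove('*10')
--
--     restantes = alelos_unicos + alelos_especiales
--
--     # --- LÓGICA DE RETORNO ORIGINAL (SIN 'sorted()') ---
--
--     if len(finales) == 0: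
--         if len(restantes)==0:
--             return '*1/*1'
--         elif len(restantes) == 1:
--             return f'*1/{restantes[0]}'
--         else:
--             return f'{restantes[0]}/{restantes[1]}'
--
--     elif len(finales) == 1:
--         if len(restantes) == 1:
--             return f'{finales[0]}/{restantes[0]}'
--         elif len(restantes) == 0:
--             return f'*1/{finales[0]}'
--
--     elif len(finales)==2:
--          return f'{finales[0]}/{finales[1]}'
--
--     # Fallback (si la lógica no cubre un caso, ej: finales=1, restantes=2)
--     # Devolvemos un valor que probablemente falle el mapeo
--     return 'Error/Logica'
-- ===== SOURCE B (Python) =====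
-- def combinar_gen(lista_de_alelos_por_snp: list, gen: str):
--     """Arithmetic re-implementation: counts + min instead of repeated while/.remove loops."""
--     alelos_unicos = [
--         a for sublist in lista_de_alelos_por_snp
--         for a in sublist
--         if a not in ['*1', '*4', '*10', '*10*4']
--     ]
--     alelos_especiales = [
--         a for sublist in lista_de_alelos_por_snp
--         for a in sublist
--         if a in ['*4', '*10', '*10*4']
--     ]
--
--     finales = []
--     restantes_esp = alelos_especiales
--
--     if gen == 'CYP2D6':
--         c4 = alelos_especiales.count('*4')
--         c10 = alelos_especiales.count('*10')
--         c104 = alelos_especiales.count('*10*4')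
--         n1 = min(c4, c10, c104)
--         n2 = min(c104 - n1, c10 - n1)
--         finales = ['*4'] * n1 + ['*10'] * n2
--         # one filtering pass: drop every '*10', the first n1 '*4', the first n1+n2 '*10*4'
--         restantes_esp = []
--         s4, s104 = n1, n1 + n2
--         for a in alelos_especiales:
--             if a == '*10':
--                 continue
--             if a == '*4' and s4 > 0:
--                 s4 -= 1
--                 continue
--             if a == '*10*4' and s104 > 0:
--                 s104 -= 1
--                 continue
--             restantes_esp.append(a)
--
--     restantes = alelos_unicos + restantes_esp
--
--     if len(finales) == 0:
--         if len(restantes) == 0: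
--             return '*1/*1'
--         elif len(restantes) == 1:
--             return f'*1/{restantes[0]}'
--         else:
--             return f'{restantes[0]}/{restantes[1]}'
--     elif len(finales) == 1:
--         if len(restantes) == 1:
--             return f'{finales[0]}/{restantes[0]}'
--         elif len(restantes) == 0:
--             return f'*1/{finales[0]}'
--     elif len(finales) == 2:
--         return f'{finales[0]}/{finales[1]}'
--     return 'Error/Logica'
-- ===== Notes on version B (the rewrite author's own statement) =====
-- stated objective: simpler
-- what changed: A's three mutating while/.remove loops over the special-allele list are replaced by closed-form counts (n1 = min of the three counts, n2 = min of the leftovers), list-replication for 'finales', and one order-preserving filtering pass that skips the consumed occurrences; the comprehensions and return ladder are unchanged.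
import Mathlib
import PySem

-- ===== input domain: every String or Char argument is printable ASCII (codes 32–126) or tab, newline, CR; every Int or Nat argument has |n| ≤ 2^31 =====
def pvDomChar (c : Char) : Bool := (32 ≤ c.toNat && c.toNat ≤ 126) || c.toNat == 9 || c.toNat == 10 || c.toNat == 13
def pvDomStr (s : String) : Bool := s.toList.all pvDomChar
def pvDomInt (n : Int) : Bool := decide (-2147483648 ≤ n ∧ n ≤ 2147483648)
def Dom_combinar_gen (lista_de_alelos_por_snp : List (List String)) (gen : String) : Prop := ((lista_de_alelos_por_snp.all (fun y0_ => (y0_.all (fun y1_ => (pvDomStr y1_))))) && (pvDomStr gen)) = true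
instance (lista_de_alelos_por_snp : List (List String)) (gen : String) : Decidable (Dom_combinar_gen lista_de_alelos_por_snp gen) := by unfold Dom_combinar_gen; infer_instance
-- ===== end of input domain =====

-- B replaces A's three while/remove loops by closed-form counts (n1 = min of the three
-- special-allele counts, n2 from the leftovers) and ONE filtering pass; same return value.
-- A mutates its local list only (no argument mutation is observable).

-- shared helpers: both Pythons contain the identical two comprehensions and the
-- identical return ladder, so they are defined once and used by both ports.
def pvUnicos (lista : List (List String)) : List String :=
  lista.flatMap (fun sublist => sublist.filter (fun a => !(["*1", "*4", "*10", "*10*4"].contains a)))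

def pvEspeciales (lista : List (List String)) : List String :=
  lista.flatMap (fun sublist => sublist.filter (fun a => ["*4", "*10", "*10*4"].contains a))

-- the final if/elif return ladder, shared verbatim by both sources
def pvRet (finales restantes : List String) : String :=
  if finales.length = 0 then
    if restantes.length = 0 then "*1/*1"
    else if restantes.length = 1 then "*1/" ++ restantes.getD 0 ""
    else restantes.getD 0 "" ++ "/" ++ restantes.getD 1 ""
  else if finales.length = 1 then
    if restantes.length = 1 then finales.getD 0 "" ++ "/" ++ restantes.getD 0 ""
    else if restantes.length = 0 then "*1/" ++ finales.getD 0 ""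
    else "Error/Logica"
  else if finales.length = 2 then finales.getD 0 "" ++ "/" ++ finales.getD 1 ""
  else "Error/Logica"

-- ===== PORT A =====
-- list.remove(v): every call in A is guarded by a membership test, so the
-- ValueError case (remove? = none) is unreachable; it is mapped to the identity.
def pyRemove (xs : List String) (a : String) : List String :=
  (PySem.List.remove? xs a).getD xs

theorem length_pyRemove_of_mem {a : String} {xs : List String} (h : a ∈ xs) :
    (pyRemove xs a).length + 1 = xs.length := by
  have hlen : 0 < xs.length := List.length_pos_of_mem h
  rw [pyRemove, PySem.List.remove?_eq_some_erase xs a h, Option.getD_some,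
    List.length_erase_of_mem h]
  omega

theorem mem_pyRemove_of_ne {a b : String} {xs : List String} (hne : b ≠ a) (h : b ∈ xs) :
    b ∈ pyRemove xs a := by
  rw [pyRemove]
  cases hx : PySem.List.remove? xs a with
  | none => simpa using h
  | some ys =>
    have : a ∈ xs := by
      by_contra hmem
      rw [(PySem.List.remove?_eq_none_iff xs a).mpr hmem] at hx; cases hx
    rw [PySem.List.remove?_eq_some_erase xs a this] at hx
    cases hx
    exact (List.mem_erase_of_ne hne).mpr h

-- first while loop: while *10*4,*10,*4 all present, remove one of each, append '*4'
def loopA1 (es fins : List String) : List String × List String :=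
  if h : "*10*4" ∈ es ∧ "*10" ∈ es ∧ "*4" ∈ es then
    loopA1 (pyRemove (pyRemove (pyRemove es "*10") "*10*4") "*4") (fins ++ ["*4"])
  else (es, fins)
termination_by es.length
decreasing_by
  have h1 := length_pyRemove_of_mem h.2.1
  have h2 := length_pyRemove_of_mem
    (mem_pyRemove_of_ne (show ("*10*4" : String) ≠ "*10" by decide) h.1)
  have h3 := length_pyRemove_of_mem
    (mem_pyRemove_of_ne (show ("*4" : String) ≠ "*10*4" by decide)
      (mem_pyRemove_of_ne (show ("*4" : String) ≠ "*10" by decide) h.2.2))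
  omega

-- second while loop: while *10*4 and *10 present, remove one of each, append '*10'
def loopA2 (es fins : List String) : List String × List String :=
  if h : "*10*4" ∈ es ∧ "*10" ∈ es then
    loopA2 (pyRemove (pyRemove es "*10") "*10*4") (fins ++ ["*10"])
  else (es, fins)
termination_by es.length
decreasing_by
  have h1 := length_pyRemove_of_mem h.2
  have h2 := length_pyRemove_of_mem
    (mem_pyRemove_of_ne (show ("*10*4" : String) ≠ "*10" by decide) h.1)
  omega

def combinar_gen (lista_de_alelos_por_snp : List (List String)) (gen : String) : String :=
  let alelos_unicos := pvUnicos lista_de_alelos_por_snp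
  let alelos_especiales := pvEspeciales lista_de_alelos_por_snp
  let p : List String × List String :=
    if gen = "CYP2D6" then
      let p1 := loopA1 alelos_especiales []
      let p2 := loopA2 p1.1 p1.2
      -- for i in range(count('*10')): remove('*10')
      (((List.range (p2.1.count "*10")).foldl (fun acc _ => pyRemove acc "*10") p2.1), p2.2)
    else (alelos_especiales, [])
  pvRet p.2 (alelos_unicos ++ p.1)

-- ===== PORT B =====
-- B's single filtering pass: drop every '*10', the first s4 '*4', the first s104 '*10*4'
def passB (es : List String) (s4 s104 : Nat) : List String :=
  (es.foldl
    (fun (st : List String × Nat × Nat) a =>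
      if a = "*10" then st
      else if a = "*4" ∧ 0 < st.2.1 then (st.1, st.2.1 - 1, st.2.2)
      else if a = "*10*4" ∧ 0 < st.2.2 then (st.1, st.2.1, st.2.2 - 1)
      else (st.1 ++ [a], st.2.1, st.2.2))
    ([], s4, s104)).1

def combinar_gen_alt (lista_de_alelos_por_snp : List (List String)) (gen : String) : String :=
  let alelos_unicos := pvUnicos lista_de_alelos_por_snp
  let alelos_especiales := pvEspeciales lista_de_alelos_por_snp
  let p : List String × List String :=
    if gen = "CYP2D6" then
      let c4 := alelos_especiales.count "*4"
      let c10 := alelos_especiales.count "*10"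
      let c104 := alelos_especiales.count "*10*4"
      let n1 := min (min c4 c10) c104
      let n2 := min (c104 - n1) (c10 - n1)
      (passB alelos_especiales n1 (n1 + n2), List.replicate n1 "*4" ++ List.replicate n2 "*10")
    else (alelos_especiales, [])
  pvRet p.2 (alelos_unicos ++ p.1)

-- ===== PRECONDITION & SPEC =====
def Spec_combinar_gen (lista_de_alelos_por_snp : List (List String)) (gen : String) (out : String) : Prop := out = combinar_gen_alt lista_de_alelos_por_snp gen
instance (lista_de_alelos_por_snp : List (List String)) (gen : String) (out : String) : Decidable (Spec_combinar_gen lista_de_alelos_por_snp gen out) := by unfold Spec_combinar_gen; infer_instance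

-- ===== CLAIM (what is proved, stated in full; the proofs are below) =====
def Claim_equal_combinar_gen : Prop := ∀ (lista_de_alelos_por_snp : List (List String)) (gen : String), Dom_combinar_gen lista_de_alelos_por_snp gen → Spec_combinar_gen lista_de_alelos_por_snp gen (combinar_gen lista_de_alelos_por_snp gen)

-- ===== LEMMAS AND PROOFS =====

-- skipN xs a n: xs with its first n occurrences of a removed
def skipN : List String → String → Nat → List String
  | xs, _, 0 => xs
  | [], _, _ + 1 => []
  | x :: xs, a, n + 1 => if x = a then skipN xs a n else x :: skipN xs a (n + 1)

theorem skipN_nil (a : String) (n : Nat) : skipN [] a n = [] := by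
  cases n <;> rfl

theorem skipN_zero (xs : List String) (a : String) : skipN xs a 0 = xs := by
  cases xs <;> rfl

theorem skipN_cons_ne {x a : String} (xs : List String) (h : x ≠ a) (n : Nat) :
    skipN (x :: xs) a n = x :: skipN xs a n := by
  cases n with
  | zero => rw [skipN_zero, skipN_zero]
  | succ m => simp [skipN, h]

theorem skipN_cons_self (xs : List String) (a : String) (n : Nat) :
    skipN (a :: xs) a (n + 1) = skipN xs a n := by
  simp [skipN]

theorem pyRemove_eq_skipN (xs : List String) (a : String) : pyRemove xs a = skipN xs a 1 := by
  induction xs with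
  | nil => rfl
  | cons x xs ih =>
    by_cases hx : x = a
    · subst hx
      simp [pyRemove, PySem.List.remove?_cons_self, skipN]
    · rw [skipN_cons_ne xs hx, pyRemove, PySem.List.remove?_cons_of_ne xs hx]
      cases h : PySem.List.remove? xs a with
      | none =>
        have hmem := (PySem.List.remove?_eq_none_iff xs a).mp h
        rw [pyRemove, h] at ih
        simp [← ih]
      | some ys =>
        rw [pyRemove, h] at ih
        simp [← ih]

theorem skipN_skipN (xs : List String) (a : String) (m n : Nat) :
    skipN (skipN xs a m) a n = skipN xs a (m + n) := by
  induction xs generalizing m n with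
  | nil => simp [skipN_nil]
  | cons x xs ih =>
    by_cases hx : x = a
    · subst hx
      cases m with
      | zero => rw [skipN_zero, Nat.zero_add]
      | succ m' =>
        rw [skipN_cons_self, ih, show m' + 1 + n = (m' + n) + 1 from by omega,
          skipN_cons_self]
    · rw [skipN_cons_ne xs hx, skipN_cons_ne _ hx, skipN_cons_ne xs hx, ih]

theorem skipN_comm {a b : String} (xs : List String) (hab : a ≠ b) (m n : Nat) :
    skipN (skipN xs a m) b n = skipN (skipN xs b n) a m := by
  induction xs generalizing m n with
  | nil => simp [skipN_nil]
  | cons x xs ih =>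
    by_cases hxa : x = a
    · subst hxa
      cases m with
      | zero => rw [skipN_zero, skipN_zero]
      | succ m' =>
        rw [skipN_cons_self, skipN_cons_ne xs hab, skipN_cons_self, ih]
    · by_cases hxb : x = b
      · subst hxb
        cases n with
        | zero => rw [skipN_zero, skipN_zero]
        | succ n' =>
          rw [skipN_cons_ne xs hxa, skipN_cons_self, skipN_cons_self, ih]
      · rw [skipN_cons_ne xs hxa, skipN_cons_ne _ hxb, skipN_cons_ne xs hxb,
          skipN_cons_ne _ hxa, ih]

theorem count_skipN_self (xs : List String) (a : String) (n : Nat) :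
    (skipN xs a n).count a = xs.count a - n := by
  induction xs generalizing n with
  | nil => simp [skipN_nil]
  | cons x xs ih =>
    by_cases hx : x = a
    · subst hx
      cases n with
      | zero => rw [skipN_zero]; omega
      | succ m => rw [skipN_cons_self, ih, List.count_cons_self]; omega
    · rw [skipN_cons_ne xs hx]
      simp [hx, ih]

theorem count_skipN_ne {a b : String} (xs : List String) (h : b ≠ a) (n : Nat) :
    (skipN xs a n).count b = xs.count b := by
  induction xs generalizing n with
  | nil => simp [skipN_nil]
  | cons x xs ih =>
    by_cases hx : x = a
    · subst hx
      cases n with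
      | zero => rw [skipN_zero]
      | succ m =>
        rw [skipN_cons_self, ih]
        have hxb : (x == b) = false := by
          simp only [beq_eq_false_iff_ne]; exact fun e => h e.symm
        simp [List.count_cons, hxb]
    · rw [skipN_cons_ne xs hx]
      simp [List.count_cons, ih]

theorem skipN_of_count_le : ∀ (xs : List String) (a : String) (n : Nat),
    xs.count a ≤ n → skipN xs a n = xs.filter (fun x => !(x == a)) := by
  intro xs a
  induction xs with
  | nil => intro n _; simp [skipN_nil]
  | cons x xs ih =>
    intro n h
    by_cases hx : x = a
    · subst hx
      cases n with
      | zero => simp at h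
      | succ m =>
        rw [skipN_cons_self, ih m (by simp at h; omega),
          List.filter_cons_of_neg (by simp)]
    · rw [skipN_cons_ne xs hx, ih n (by simpa [List.count_cons, hx] using h),
        List.filter_cons_of_pos (by simp [hx])]

theorem filter_skipN (xs : List String) (a b : String) (h : a ≠ b) (n : Nat) :
    (skipN xs a n).filter (fun x => !(x == b)) = skipN (xs.filter (fun x => !(x == b))) a n := by
  induction xs generalizing n with
  | nil => simp [skipN_nil]
  | cons x xs ih =>
    by_cases hx : x = a
    · subst hx
      cases n with
      | zero => rw [skipN_zero, skipN_zero]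
      | succ m =>
        rw [skipN_cons_self, List.filter_cons_of_pos (by simp [h]), skipN_cons_self, ih]
    · rw [skipN_cons_ne xs hx]
      by_cases hxb : x = b
      · subst hxb
        rw [List.filter_cons_of_neg (by simp), List.filter_cons_of_neg (by simp)]
        exact ih n
      · rw [List.filter_cons_of_pos (by simp [hxb]), List.filter_cons_of_pos (by simp [hxb]),
          skipN_cons_ne _ hx, ih]

-- ---- characterisation of A's loops ----

def m1 (es : List String) : Nat :=
  min (es.count "*10") (min (es.count "*10*4") (es.count "*4"))

def m2 (es : List String) : Nat :=
  min (es.count "*10") (es.count "*10*4")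

theorem chain1_step (es : List String) (k : Nat) :
    skipN (skipN (skipN (skipN (skipN (skipN es "*10" 1) "*10*4" 1) "*4" 1) "*10" k)
        "*10*4" k) "*4" k
    = skipN (skipN (skipN es "*10" (1 + k)) "*10*4" (1 + k)) "*4" (1 + k) := by
  rw [skipN_comm _ (show ("*4" : String) ≠ "*10" by decide) 1 k,
    skipN_comm _ (show ("*10*4" : String) ≠ "*10" by decide) 1 k,
    skipN_skipN es "*10" 1 k,
    skipN_comm _ (show ("*4" : String) ≠ "*10*4" by decide) 1 k,
    skipN_skipN _ "*10*4" 1 k,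
    skipN_skipN _ "*4" 1 k]

theorem chain2_step (es : List String) (k : Nat) :
    skipN (skipN (skipN (skipN es "*10" 1) "*10*4" 1) "*10" k) "*10*4" k
    = skipN (skipN es "*10" (1 + k)) "*10*4" (1 + k) := by
  rw [skipN_comm _ (show ("*10*4" : String) ≠ "*10" by decide) 1 k,
    skipN_skipN es "*10" 1 k,
    skipN_skipN _ "*10*4" 1 k]

theorem loopA1_eq (es fins : List String) :
    loopA1 es fins =
      (skipN (skipN (skipN es "*10" (m1 es)) "*10*4" (m1 es)) "*4" (m1 es),
       fins ++ List.replicate (m1 es) "*4") := by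
  fun_induction loopA1 es fins with
  | case1 es fins h ih =>
    rw [ih]
    have hes' : pyRemove (pyRemove (pyRemove es "*10") "*10*4") "*4"
        = skipN (skipN (skipN es "*10" 1) "*10*4" 1) "*4" 1 := by
      rw [pyRemove_eq_skipN, pyRemove_eq_skipN, pyRemove_eq_skipN]
    have h10 : (pyRemove (pyRemove (pyRemove es "*10") "*10*4") "*4").count "*10"
        = es.count "*10" - 1 := by
      rw [hes', count_skipN_ne _ (by decide), count_skipN_ne _ (by decide), count_skipN_self]
    have h104 : (pyRemove (pyRemove (pyRemove es "*10") "*10*4") "*4").count "*10*4"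
        = es.count "*10*4" - 1 := by
      rw [hes', count_skipN_ne _ (by decide), count_skipN_self, count_skipN_ne _ (by decide)]
    have h4 : (pyRemove (pyRemove (pyRemove es "*10") "*10*4") "*4").count "*4"
        = es.count "*4" - 1 := by
      rw [hes', count_skipN_self, count_skipN_ne _ (by decide), count_skipN_ne _ (by decide)]
    have hc104 : 0 < es.count "*10*4" := List.count_pos_iff.mpr h.1
    have hc10 : 0 < es.count "*10" := List.count_pos_iff.mpr h.2.1
    have hc4 : 0 < es.count "*4" := List.count_pos_iff.mpr h.2.2
    have hm : m1 es = 1 + m1 (pyRemove (pyRemove (pyRemove es "*10") "*10*4") "*4") := by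
      unfold m1
      rw [h10, h104, h4]
      omega
    rw [hm, hes', chain1_step, Nat.add_comm 1, List.replicate_succ, List.append_assoc]
    rfl
  | case2 es fins h =>
    have hm : m1 es = 0 := by
      unfold m1
      rcases not_and_or.mp h with h' | h'
      · have : es.count "*10*4" = 0 := List.count_eq_zero.mpr h'
        omega
      · rcases not_and_or.mp h' with h'' | h''
        · have : es.count "*10" = 0 := List.count_eq_zero.mpr h''
          omega
        · have : es.count "*4" = 0 := List.count_eq_zero.mpr h''
          omega
    rw [hm, skipN_zero, skipN_zero, skipN_zero, List.replicate_zero, List.append_nil]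

theorem loopA2_eq (es fins : List String) :
    loopA2 es fins =
      (skipN (skipN es "*10" (m2 es)) "*10*4" (m2 es),
       fins ++ List.replicate (m2 es) "*10") := by
  fun_induction loopA2 es fins with
  | case1 es fins h ih =>
    rw [ih]
    have hes' : pyRemove (pyRemove es "*10") "*10*4"
        = skipN (skipN es "*10" 1) "*10*4" 1 := by
      rw [pyRemove_eq_skipN, pyRemove_eq_skipN]
    have h10 : (pyRemove (pyRemove es "*10") "*10*4").count "*10" = es.count "*10" - 1 := by
      rw [hes', count_skipN_ne _ (by decide), count_skipN_self]
    have h104 : (pyRemove (pyRemove es "*10") "*10*4").count "*10*4"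
        = es.count "*10*4" - 1 := by
      rw [hes', count_skipN_self, count_skipN_ne _ (by decide)]
    have hc104 : 0 < es.count "*10*4" := List.count_pos_iff.mpr h.1
    have hc10 : 0 < es.count "*10" := List.count_pos_iff.mpr h.2
    have hm : m2 es = 1 + m2 (pyRemove (pyRemove es "*10") "*10*4") := by
      unfold m2
      rw [h10, h104]
      omega
    rw [hm, hes', chain2_step, Nat.add_comm 1, List.replicate_succ, List.append_assoc]
    rfl
  | case2 es fins h =>
    have hm : m2 es = 0 := by
      unfold m2
      rcases not_and_or.mp h with h' | h'
      · have : es.count "*10*4" = 0 := List.count_eq_zero.mpr h'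
        omega
      · have : es.count "*10" = 0 := List.count_eq_zero.mpr h'
        omega
    rw [hm, skipN_zero, skipN_zero, List.replicate_zero, List.append_nil]

theorem foldl_remove_range (a : String) : ∀ (n : Nat) (xs : List String),
    (List.range n).foldl (fun acc _ => pyRemove acc a) xs = skipN xs a n := by
  intro n
  induction n with
  | zero => intro xs; rw [List.range_zero, List.foldl_nil, skipN_zero]
  | succ m ih =>
    intro xs
    rw [List.range_succ, List.foldl_append, ih, List.foldl_cons, List.foldl_nil,
      pyRemove_eq_skipN, skipN_skipN]

-- ---- characterisation of B's single pass ----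

theorem passB_foldl : ∀ (xs acc : List String) (s4 s104 : Nat),
    (xs.foldl
      (fun (st : List String × Nat × Nat) a =>
        if a = "*10" then st
        else if a = "*4" ∧ 0 < st.2.1 then (st.1, st.2.1 - 1, st.2.2)
        else if a = "*10*4" ∧ 0 < st.2.2 then (st.1, st.2.1, st.2.2 - 1)
        else (st.1 ++ [a], st.2.1, st.2.2))
      (acc, s4, s104)).1
    = acc ++ (skipN (skipN xs "*10*4" s104) "*4" s4).filter (fun x => !(x == "*10")) := by
  intro xs
  induction xs with
  | nil => intro acc s4 s104; simp [skipN_nil]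
  | cons x xs ih =>
    intro acc s4 s104
    rw [List.foldl_cons]
    by_cases h10 : x = "*10"
    · subst h10
      rw [if_pos rfl, ih, skipN_cons_ne _ (by decide), skipN_cons_ne _ (by decide),
        List.filter_cons_of_neg (by simp)]
    · by_cases h4 : x = "*4"
      · subst h4
        rw [skipN_cons_ne _ (by decide)]
        by_cases hs : 0 < s4
        · obtain ⟨t, rfl⟩ : ∃ t, s4 = t + 1 := ⟨s4 - 1, by omega⟩
          rw [if_neg (by decide), if_pos ⟨rfl, hs⟩]
          dsimp only
          rw [Nat.add_sub_cancel, ih, skipN_cons_self]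
        · have hs0 : s4 = 0 := by omega
          subst hs0
          rw [if_neg (by decide), if_neg (by simp), if_neg (by simp)]
          dsimp only
          rw [ih, skipN_zero, skipN_zero, List.filter_cons_of_pos (by decide),
            List.append_assoc, List.singleton_append]
      · by_cases h104 : x = "*10*4"
        · subst h104
          by_cases hs : 0 < s104
          · obtain ⟨t, rfl⟩ : ∃ t, s104 = t + 1 := ⟨s104 - 1, by omega⟩
            rw [if_neg (by decide), if_neg (by simp), if_pos ⟨rfl, hs⟩]
            dsimp only
            rw [Nat.add_sub_cancel, ih, skipN_cons_self]
          · have hs0 : s104 = 0 := by omega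
            subst hs0
            rw [if_neg (by decide), if_neg (by simp), if_neg (by simp)]
            dsimp only
            rw [ih, skipN_zero, skipN_zero, skipN_cons_ne _ (by decide),
              List.filter_cons_of_pos (by decide), List.append_assoc, List.singleton_append]
        · rw [if_neg h10, if_neg (by simp [h4]), if_neg (by simp [h104])]
          dsimp only
          rw [ih, skipN_cons_ne _ h104, skipN_cons_ne _ h4,
            List.filter_cons_of_pos (by simp [h10]), List.append_assoc, List.singleton_append]

theorem passB_eq (xs : List String) (s4 s104 : Nat) :
    passB xs s4 s104
      = (skipN (skipN xs "*10*4" s104) "*4" s4).filter (fun x => !(x == "*10")) := by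
  rw [passB, passB_foldl, List.nil_append]

-- ---- the two remainder computations agree ----

theorem remA_eq (es : List String) (k1 k2 K : Nat) (hK : k1 + k2 + K = es.count "*10") :
    skipN (skipN (skipN (skipN (skipN (skipN es "*10" k1) "*10*4" k1) "*4" k1) "*10" k2)
        "*10*4" k2) "*10" K
    = (skipN (skipN es "*10*4" (k1 + k2)) "*4" k1).filter (fun x => !(x == "*10")) := by
  rw [skipN_comm (skipN (skipN es "*10" k1) "*10*4" k1)
      (show ("*4" : String) ≠ "*10" by decide) k1 k2,
    skipN_comm (skipN es "*10" k1) (show ("*10*4" : String) ≠ "*10" by decide) k1 k2,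
    skipN_skipN es "*10" k1 k2,
    skipN_comm (skipN (skipN (skipN es "*10" (k1 + k2)) "*10*4" k1) "*4" k1)
      (show ("*10*4" : String) ≠ "*10" by decide) k2 K,
    skipN_comm (skipN (skipN es "*10" (k1 + k2)) "*10*4" k1)
      (show ("*4" : String) ≠ "*10" by decide) k1 K,
    skipN_comm (skipN es "*10" (k1 + k2)) (show ("*10*4" : String) ≠ "*10" by decide) k1 K,
    skipN_skipN es "*10" (k1 + k2) K,
    show k1 + k2 + K = es.count "*10" from hK,
    skipN_of_count_le es "*10" _ (Nat.le_refl _),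
    ← filter_skipN es "*10*4" "*10" (by decide) k1,
    ← filter_skipN _ "*4" "*10" (by decide) k1,
    ← filter_skipN _ "*10*4" "*10" (by decide) k2,
    skipN_comm (skipN es "*10*4" k1) (show ("*4" : String) ≠ "*10*4" by decide) k1 k2,
    skipN_skipN es "*10*4" k1 k2]

-- ===== VERDICT (by name: the statement is the Claim_ definition above) =====
theorem combinar_gen_spec : Claim_equal_combinar_gen := by
  unfold Claim_equal_combinar_gen
  intro lista gen _
  unfold Spec_combinar_gen combinar_gen combinar_gen_alt
  by_cases hg : gen = "CYP2D6"
  · simp only [hg, if_pos]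
    rw [loopA1_eq]
    dsimp only
    rw [loopA2_eq]
    dsimp only
    rw [foldl_remove_range]
    set es := pvEspeciales lista with hes
    set k1 := m1 es with hk1def
    set k2 := m2 (skipN (skipN (skipN es "*10" k1) "*10*4" k1) "*4" k1) with hk2def
    have hc10e1 : (skipN (skipN (skipN es "*10" k1) "*10*4" k1) "*4" k1).count "*10"
        = es.count "*10" - k1 := by
      rw [count_skipN_ne _ (by decide), count_skipN_ne _ (by decide), count_skipN_self]
    have hc104e1 : (skipN (skipN (skipN es "*10" k1) "*10*4" k1) "*4" k1).count "*10*4"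
        = es.count "*10*4" - k1 := by
      rw [count_skipN_ne _ (by decide), count_skipN_self, count_skipN_ne _ (by decide)]
    have hk1b : k1 = min (min (es.count "*4") (es.count "*10")) (es.count "*10*4") := by
      rw [hk1def]; unfold m1; omega
    have hk2b : k2 = min (es.count "*10*4" - k1) (es.count "*10" - k1) := by
      rw [hk2def]; unfold m2; rw [hc10e1, hc104e1]; omega
    have hc10e2 :
        (skipN (skipN (skipN (skipN (skipN es "*10" k1) "*10*4" k1) "*4" k1) "*10" k2)
          "*10*4" k2).count "*10" = es.count "*10" - k1 - k2 := by
      rw [count_skipN_ne _ (by decide), count_skipN_self, hc10e1]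
    have hk1le : k1 ≤ es.count "*10" := by rw [hk1b]; omega
    have hk2le : k2 ≤ es.count "*10" - k1 := by rw [hk2b]; omega
    rw [hc10e2, remA_eq es k1 k2 (es.count "*10" - k1 - k2) (by omega), passB_eq,
      ← hk1b, ← hk2b, List.nil_append]
  · simp only [if_neg hg]
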